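-- pv_equiv track=rewrite | github.com/TransportScotland/voyager-converter | data_cif.py | parse_fixed_line
-- ===== SOURCE A (Python) =====
-- def parse_fixed_line(line, key, lengths, use_columns=None,
--                      condition_index=None, condition=None):
--
--     if condition_index is not None:
--         if line[condition_index:condition_index+len(condition)] != condition:
--             return [None for x in use_columns]
--     split_line = []
--     for col, length in zip(key, lengths):
--         if col in use_columns:
--             i = key.index(col)
--             split_line.append(line[sum(lengths[:i]):sum(lengths[:i+1])])
--     return split_line
-- ===== SOURCE B (Python) =====
-- def parse_fixed_line(line, key, lengths, use_columns=None,
--                      condition_index=None, condition=None):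
--     if condition_index is not None:
--         if line[condition_index:condition_index + len(condition)] != condition:
--             return [None for x in use_columns]
--     # precompute column start offsets (prefix sums) once
--     starts = [0]
--     total = 0
--     for length in lengths:
--         total += length
--         starts.append(total)
--     # first-occurrence index of each column name, one pass
--     first = {}
--     for j, col in enumerate(key):
--         if col not in first:
--             first[col] = j
--     wanted = set(use_columns)
--     out = []
--     for col, _length in zip(key, lengths):
--         if col in wanted:
--             i = first[col]
--             out.append(line[starts[i]:starts[i + 1]])
--     return out
-- ===== Notes on version B (the rewrite author's own statement) =====
-- stated objective: alternative
-- what changed: A rescans key with key.index(col) and re-sums lengths[:i] and lengths[:i+1] inside the output loop; B precomputes the prefix-sum offsets and a first-occurrence index map once and does a single pass with set membership.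
import Mathlib
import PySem

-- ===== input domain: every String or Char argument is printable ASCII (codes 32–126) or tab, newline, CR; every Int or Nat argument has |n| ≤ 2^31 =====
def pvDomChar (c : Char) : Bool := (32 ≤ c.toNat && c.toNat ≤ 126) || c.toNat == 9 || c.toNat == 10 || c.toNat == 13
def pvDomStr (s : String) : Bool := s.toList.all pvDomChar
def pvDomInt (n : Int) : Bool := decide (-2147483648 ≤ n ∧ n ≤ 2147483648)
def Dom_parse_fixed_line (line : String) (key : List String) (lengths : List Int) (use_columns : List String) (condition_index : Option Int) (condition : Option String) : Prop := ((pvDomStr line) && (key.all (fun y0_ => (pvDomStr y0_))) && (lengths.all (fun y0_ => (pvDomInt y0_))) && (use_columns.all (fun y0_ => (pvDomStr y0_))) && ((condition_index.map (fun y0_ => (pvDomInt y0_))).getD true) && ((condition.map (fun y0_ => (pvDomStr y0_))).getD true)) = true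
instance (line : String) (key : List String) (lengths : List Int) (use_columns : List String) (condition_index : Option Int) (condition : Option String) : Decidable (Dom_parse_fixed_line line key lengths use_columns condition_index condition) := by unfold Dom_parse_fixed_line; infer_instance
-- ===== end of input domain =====

-- B replaces A's per-column key.index + sum(lengths[:i]) rescans by one prefix-sum pass and a
-- first-occurrence index map built once (objective: alternative). Equivalence of return values.

-- ===== PORT A =====
-- the 'for col, length in zip(key, lengths)' loop of A, with its per-iteration
-- key.index(col) scan and sum(lengths[:i]) / sum(lengths[:i+1]) slices
def pflA_loop (line : String) (key : List String) (lengths : List Int) (use_columns : List String) : List (Option String) :=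
  (key.zip lengths).foldl (fun acc p =>
    if use_columns.contains p.1 then
      match PySem.List.index? key p.1 with
      | some i => acc ++ [some (PySem.Str.slice line
          (some (PySem.List.slice lengths none (some (i : Int))).sum)
          (some (PySem.List.slice lengths none (some ((i : Int) + 1))).sum))]
      | none => acc      -- unreachable: p.1 comes from key
    else acc) []

def parse_fixed_line (line : String) (key : List String) (lengths : List Int) (use_columns : List String) (condition_index : Option Int) (condition : Option String) : List (Option String) :=
  match condition_index with
  | some ci =>
      -- Python evaluates len(condition): raises TypeError when condition is None (excluded by Pre_)
      let cond := condition.getD ""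
      if PySem.Str.slice line (some ci) (some (ci + PySem.Str.len cond)) ≠ cond then
        use_columns.map (fun _ => none)
      else pflA_loop line key lengths use_columns
  | none => pflA_loop line key lengths use_columns

-- ===== PORT B =====
-- starts = [0]; total = 0; for length in lengths: total += length; starts.append(total)
def pflB_starts (lengths : List Int) : List Int :=
  (lengths.foldl (fun st l => (st.1 ++ [st.2 + l], st.2 + l)) (([0] : List Int), (0 : Int))).1

-- first = {}; for j, col in enumerate(key): if col not in first: first[col] = j
def pflB_first (key : List String) : PySem.Dict String Int :=
  (PySem.List.enumerate key).foldl
    (fun d p => if d.contains p.2 then d else d.insert p.2 p.1) PySem.Dict.empty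

-- out = []; for col, _ in zip(key, lengths): if col in wanted: i = first[col]; out.append(line[starts[i]:starts[i+1]])
-- (first[col] always hits: col comes from key; ported total as getD 0)
def pflB_loop (line : String) (key : List String) (lengths : List Int) (wanted : PySem.Set String) : List (Option String) :=
  let starts := pflB_starts lengths
  let first := pflB_first key
  (key.zip lengths).foldl (fun acc p =>
    if wanted.contains p.1 then
      let i := first.getD p.1 0
      acc ++ [some (PySem.Str.slice line
        (some (PySem.List.pyGetD starts i 0))
        (some (PySem.List.pyGetD starts (i + 1) 0)))]
    else acc) []

def parse_fixed_line_alt (line : String) (key : List String) (lengths : List Int) (use_columns : List String) (condition_index : Option Int) (condition : Option String) : List (Option String) :=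
  match condition_index with
  | some ci =>
      let cond := condition.getD ""
      if PySem.Str.slice line (some ci) (some (ci + PySem.Str.len cond)) ≠ cond then
        use_columns.map (fun _ => none)
      else pflB_loop line key lengths (PySem.Set.ofList use_columns)
  | none => pflB_loop line key lengths (PySem.Set.ofList use_columns)

-- ===== PRECONDITION & SPEC =====
-- Pre_ excludes only inputs where A raises: condition_index given with condition=None makes
-- Python's len(condition) raise TypeError.
def Pre_parse_fixed_line (line : String) (key : List String) (lengths : List Int) (use_columns : List String) (condition_index : Option Int) (condition : Option String) : Prop :=
  condition_index ≠ none → condition ≠ none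
instance (line : String) (key : List String) (lengths : List Int) (use_columns : List String) (condition_index : Option Int) (condition : Option String) : Decidable (Pre_parse_fixed_line line key lengths use_columns condition_index condition) := by unfold Pre_parse_fixed_line; infer_instance

def pvWitness_parse_fixed_line : String × List String × List Int × List String × Option Int × Option String :=
  ("ABCDE", ["x", "y"], [2, 3], ["y"], some 0, some "A")

def Spec_parse_fixed_line (line : String) (key : List String) (lengths : List Int) (use_columns : List String) (condition_index : Option Int) (condition : Option String) (out : List (Option String)) : Prop := out = parse_fixed_line_alt line key lengths use_columns condition_index condition
instance (line : String) (key : List String) (lengths : List Int) (use_columns : List String) (condition_index : Option Int) (condition : Option String) (out : List (Option String)) : Decidable (Spec_parse_fixed_line line key lengths use_columns condition_index condition out) := by unfold Spec_parse_fixed_line; infer_instance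

-- ===== CLAIM (what is proved, stated in full; the proofs are below) =====
def Claim_equal_parse_fixed_line : Prop := ∀ (line : String) (key : List String) (lengths : List Int) (use_columns : List String) (condition_index : Option Int) (condition : Option String), Dom_parse_fixed_line line key lengths use_columns condition_index condition → Pre_parse_fixed_line line key lengths use_columns condition_index condition → Spec_parse_fixed_line line key lengths use_columns condition_index condition (parse_fixed_line line key lengths use_columns condition_index condition)

-- ===== LEMMAS AND PROOFS =====

-- starts fold invariant
lemma pfl_starts_go (ls : List Int) (acc : List Int) (t : Int) :
    (ls.foldl (fun st l => (st.1 ++ [st.2 + l], st.2 + l)) (acc, t)).1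
      = acc ++ (List.range ls.length).map (fun n => t + (ls.take (n + 1)).sum) := by
  induction ls generalizing acc t with
  | nil => simp
  | cons l ls ih =>
      simp only [List.foldl_cons, ih, List.length_cons, List.range_succ_eq_map,
        List.map_cons, List.map_map, List.take_succ_cons, List.sum_cons, List.append_assoc,
        List.take_zero, List.sum_nil, List.cons_append, List.nil_append]
      simp [Function.comp, add_assoc]

lemma pfl_starts_getD (lengths : List Int) (n : Nat) (hn : n ≤ lengths.length) :
    PySem.List.pyGetD (pflB_starts lengths) (n : Int) 0 = (lengths.take n).sum := by
  rw [PySem.List.pyGetD_natCast]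
  unfold pflB_starts
  rw [pfl_starts_go]
  cases n with
  | zero => simp
  | succ m =>
      have hm : m < lengths.length := by omega
      rw [List.getD_eq_getElem?_getD]
      simp [hm]

-- first-occurrence dict invariant
lemma pfl_first_go (ks : List String) (s : Int) (d : PySem.Dict String Int) (col : String) :
    ((PySem.List.enumerate ks s).foldl
        (fun d p => if d.contains p.2 then d else d.insert p.2 p.1) d).get? col
      = match d.get? col with
        | some v => some v
        | none => (PySem.List.index? ks col).map (fun k : Nat => s + (k : Int)) := by
  induction ks generalizing s d with
  | nil =>
      simp only [PySem.List.enumerate_nil, List.foldl_nil, PySem.List.index?_eq_idxOf?]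
      cases d.get? col <;> simp
  | cons x ks ih =>
      rw [PySem.List.enumerate_cons, List.foldl_cons]
      by_cases hx : x = col
      · subst hx
        by_cases hc : d.contains x = true
        · have hsome : (d.get? x).isSome := by
            rw [← PySem.Dict.contains_eq_isSome_get?]; exact hc
          obtain ⟨v, hv⟩ := Option.isSome_iff_exists.mp hsome
          simp only [hc, if_true, ih, hv]
        · have hc' : d.contains x = false := by simpa using hc
          have hnone : d.get? x = none := by
            rcases h : d.get? x with _ | v
            · rfl
            · exact absurd (by rw [PySem.Dict.contains_eq_isSome_get?, h]; rfl) hc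
          simp only [hc', Bool.false_eq_true, if_false, ih, PySem.Dict.get?_insert_self,
            hnone, PySem.List.index?_cons_self]
          simp
      · have hidx := PySem.List.index?_cons_of_ne ks hx (v := col)
        by_cases hc : d.contains x = true
        · simp only [hc, if_true, ih, hidx]
          cases d.get? col with
          | some v => rfl
          | none =>
              cases PySem.List.index? ks col with
              | none => rfl
              | some k => simp only [Option.map_some]; congr 1; push_cast; ring
        · have hc' : d.contains x = false := by simpa using hc
          have hg : (d.insert x s).get? col = d.get? col :=
            PySem.Dict.get?_insert_of_ne d s (fun h => hx h.symm)
          simp only [hc', Bool.false_eq_true, if_false, ih, hg, hidx]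
          cases d.get? col with
          | some v => rfl
          | none =>
              cases PySem.List.index? ks col with
              | none => rfl
              | some k => simp only [Option.map_some]; congr 1; push_cast; ring

lemma pfl_first_getD (key : List String) (col : String) (k : Nat)
    (h : PySem.List.index? key col = some k) :
    (pflB_first key).getD col 0 = (k : Int) := by
  rw [PySem.Dict.getD_eq_get?_getD]
  unfold pflB_first
  rw [pfl_first_go]
  simp only [PySem.List.index?_eq_idxOf?] at h
  simp [PySem.Dict.get?_empty, h]

-- the two output loops agree
lemma pfl_loop_eq (line : String) (key : List String) (lengths : List Int)
    (use_columns : List String) :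
    pflA_loop line key lengths use_columns
      = pflB_loop line key lengths (PySem.Set.ofList use_columns) := by
  unfold pflA_loop pflB_loop
  apply PySem.List.foldl_congr_mem
  intro acc p hp
  -- condition: membership in the list vs in set(use_columns)
  have hcond : use_columns.contains p.1 = (PySem.Set.ofList use_columns).contains p.1 := by
    rcases h : decide (p.1 ∈ use_columns) with _ | _ <;>
      simp_all [List.contains_iff_mem, PySem.Set.mem_ofList]
  rw [← hcond]
  by_cases hc : use_columns.contains p.1 = true
  · rw [if_pos hc, if_pos hc]
    -- position of p in the zip
    obtain ⟨j, hj, hpj⟩ := List.getElem_of_mem hp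
    have hjk : j < key.length := by
      have := hj; rw [List.length_zip] at this; omega
    have hjl : j < lengths.length := by
      have := hj; rw [List.length_zip] at this; omega
    have hkey : key[j] = p.1 := by
      have := hpj; rw [List.getElem_zip] at this
      exact congrArg Prod.fst this
    -- first occurrence index k of p.1 in key
    have hmem : p.1 ∈ key := hkey ▸ List.getElem_mem hjk
    obtain ⟨k, hik⟩ := Option.isSome_iff_exists.mp
      ((PySem.List.index?_isSome_iff key p.1).mpr hmem)
    obtain ⟨hklen, hkv, hfirst⟩ := PySem.List.getElem_of_index?_eq_some hik
    have hkj : k ≤ j := by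
      by_contra hlt
      exact hfirst j (by omega) hkey
    have hk1 : k + 1 ≤ lengths.length := by omega
    rw [hik]
    dsimp only
    rw [pfl_first_getD key p.1 k hik]
    rw [PySem.List.slice_to_natCast, pfl_starts_getD lengths k (by omega)]
    have : ((k : Int) + 1) = ((k + 1 : Nat) : Int) := by push_cast; ring
    rw [this, PySem.List.slice_to_natCast, pfl_starts_getD lengths (k + 1) hk1]
  · rw [if_neg hc, if_neg hc]

-- ===== VERDICT (by name: the statement is the Claim_ definition above) =====
theorem parse_fixed_line_spec : Claim_equal_parse_fixed_line := by
  intro line key lengths use_columns condition_index condition _hdom hpre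
  unfold Spec_parse_fixed_line parse_fixed_line parse_fixed_line_alt
  cases condition_index with
  | none => exact pfl_loop_eq line key lengths use_columns
  | some ci =>
      cases condition with
      | none => exact absurd rfl (hpre (by simp))
      | some c =>
          simp only [Option.getD_some]
          by_cases h : PySem.Str.slice line (some ci) (some (ci + PySem.Str.len c)) ≠ c
          · rw [if_pos h, if_pos h]
          · rw [if_neg h, if_neg h]
            exact pfl_loop_eq line key lengths use_columns
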